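-- pv_equiv track=rewrite | github.com/Javier-Rojas-Orrante/OptimizacionEstocastica | tiny_test.py | _build_hex_edges_rect
-- ===== SOURCE A (Python) =====
-- def _build_hex_edges_rect(rows, cols):
--     n_sites = rows * cols
--     N = list(range(n_sites))
--     E = set()
--     for r in range(rows):
--         for c in range(cols):
--             u = r*cols + c
--             cand = [(r, c-1), (r, c+1), (r-1, c), (r+1, c)]
--             cand += [(r-1, c-1), (r+1, c-1)] if (r % 2 == 0) else [(r-1, c+1), (r+1, c+1)]
--             for rr, cc in cand:
--                 if 0 <= rr < rows and 0 <= cc < cols: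
--                     v = rr*cols + cc
--                     if u < v:
--                         E.add((u, v))
--     return N, sorted(E)
-- ===== SOURCE B (Python) =====
-- def _build_hex_edges_rect(rows, cols):
--     # Emit edges directly in sorted order, one pass, no set and no sort:
--     # per site u (row-major), neighbours with larger index appear as
--     # u+1 (right), u+cols-1 (down-left, even rows), u+cols (down), u+cols+1 (down-right, odd rows).
--     N = list(range(rows * cols))
--     E = []
--     for r in range(rows):
--         for c in range(cols):
--             u = r * cols + c
--             if c + 1 < cols:
--                 E.append((u, u + 1))
--             if r + 1 < rows:
--                 if r % 2 == 0 and c - 1 >= 0: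
--                     E.append((u, u + cols - 1))
--                 E.append((u, u + cols))
--                 if r % 2 == 1 and c + 1 < cols:
--                     E.append((u, u + cols + 1))
--     return N, E
-- ===== Notes on version B (the rewrite author's own statement) =====
-- stated objective: faster
-- what changed: B drops A's per-site 6-candidate list, set deduplication and final sort: it emits each edge exactly once from its lower endpoint in directional order (right, down-left, down, down-right), producing the edge list already sorted in one pass.
import Mathlib
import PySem

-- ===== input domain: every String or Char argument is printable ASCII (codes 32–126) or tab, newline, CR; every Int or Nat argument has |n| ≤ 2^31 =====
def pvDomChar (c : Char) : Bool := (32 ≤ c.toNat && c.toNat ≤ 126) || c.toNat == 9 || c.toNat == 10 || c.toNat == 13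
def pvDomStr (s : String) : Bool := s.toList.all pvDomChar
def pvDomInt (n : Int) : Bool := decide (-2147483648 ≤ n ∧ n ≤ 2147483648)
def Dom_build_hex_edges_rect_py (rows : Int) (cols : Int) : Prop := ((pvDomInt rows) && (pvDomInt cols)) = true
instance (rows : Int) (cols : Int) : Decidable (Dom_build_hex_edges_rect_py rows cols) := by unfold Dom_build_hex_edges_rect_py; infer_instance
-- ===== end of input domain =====

-- B replaces A's per-site candidate list + set + final sort by a single pass that emits each
-- edge once from its lower endpoint, already in sorted order (faster: no set, no sort).

-- ===== PORT A =====
def build_hex_edges_rect_py (rows : Int) (cols : Int) : List Int × (List (Int × Int)) :=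
  let n_sites := rows * cols
  let N := PySem.List.pyRange 0 n_sites 1
  let E : PySem.Set (Int × Int) := PySem.Set.empty
  let E := (PySem.List.pyRange 0 rows 1).foldl (fun E r =>
    (PySem.List.pyRange 0 cols 1).foldl (fun E c =>
      let u := r * cols + c
      let cand := [(r, c-1), (r, c+1), (r-1, c), (r+1, c)] ++
        (if PySem.Int.mod r 2 = 0 then [(r-1, c-1), (r+1, c-1)] else [(r-1, c+1), (r+1, c+1)])
      cand.foldl (fun E rc =>
        if 0 ≤ rc.1 ∧ rc.1 < rows ∧ 0 ≤ rc.2 ∧ rc.2 < cols then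
          let v := rc.1 * cols + rc.2
          if u < v then PySem.Set.add E (u, v) else E
        else E) E) E) E
  (N, PySem.List.sorted2 E Prod.fst Prod.snd)

-- ===== PORT B =====
def build_hex_edges_rect_py_alt (rows : Int) (cols : Int) : List Int × (List (Int × Int)) :=
  let N := PySem.List.pyRange 0 (rows * cols) 1
  let E : List (Int × Int) := []
  let E := (PySem.List.pyRange 0 rows 1).foldl (fun E r =>
    (PySem.List.pyRange 0 cols 1).foldl (fun E c =>
      let u := r * cols + c
      let E := if c + 1 < cols then E ++ [(u, u + 1)] else E
      if r + 1 < rows then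
        let E := if PySem.Int.mod r 2 = 0 ∧ c - 1 ≥ 0 then E ++ [(u, u + cols - 1)] else E
        let E := E ++ [(u, u + cols)]
        if PySem.Int.mod r 2 = 1 ∧ c + 1 < cols then E ++ [(u, u + cols + 1)] else E
      else E) E) E
  (N, E)

-- ===== PRECONDITION & SPEC =====
def Spec_build_hex_edges_rect_py (rows : Int) (cols : Int) (out : List Int × (List (Int × Int))) : Prop := out = build_hex_edges_rect_py_alt rows cols
instance (rows : Int) (cols : Int) (out : List Int × (List (Int × Int))) : Decidable (Spec_build_hex_edges_rect_py rows cols out) := by unfold Spec_build_hex_edges_rect_py; infer_instance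

-- ===== CLAIM (what is proved, stated in full; the proofs are below) =====
def Claim_equal_build_hex_edges_rect_py : Prop := ∀ (rows : Int) (cols : Int), Dom_build_hex_edges_rect_py rows cols → Spec_build_hex_edges_rect_py rows cols (build_hex_edges_rect_py rows cols)

-- ===== LEMMAS AND PROOFS =====

def pvSiteA (rows cols r c : Int) : List (Int × Int) :=
  let u := r * cols + c
  (if c + 1 < cols then [(u, u + 1)] else []) ++
  (if r + 1 < rows then [(u, u + cols)] else []) ++
  (if PySem.Int.mod r 2 = 0 then
    (if r + 1 < rows ∧ 0 ≤ c - 1 then [(u, u + cols - 1)] else [])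
   else
    (if r + 1 < rows ∧ c + 1 < cols then [(u, u + cols + 1)] else []))

lemma set_add_of_not_mem {x : Int × Int} {E : List (Int × Int)} (h : x ∉ E) :
    PySem.Set.add E x = E ++ [x] := by
  unfold PySem.Set.add PySem.Set.contains
  rw [if_neg]
  simpa using h

lemma pvInnerA (rows cols r c : Int) (E : List (Int × Int))
    (hr : 0 ≤ r ∧ r < rows) (hc : 0 ≤ c ∧ c < cols)
    (hE : ∀ e ∈ E, e.1 < r * cols + c) :
    (([(r, c-1), (r, c+1), (r-1, c), (r+1, c)] ++
        (if PySem.Int.mod r 2 = 0 then [(r-1, c-1), (r+1, c-1)] else [(r-1, c+1), (r+1, c+1)])).foldl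
      (fun E rc =>
        if 0 ≤ rc.1 ∧ rc.1 < rows ∧ 0 ≤ rc.2 ∧ rc.2 < cols then
          if r * cols + c < rc.1 * cols + rc.2 then PySem.Set.add E (r * cols + c, rc.1 * cols + rc.2) else E
        else E) E)
      = E ++ pvSiteA rows cols r c := by
  have hcols : 0 < cols := by omega
  have hrc1 : (r - 1) * cols = r * cols - cols := by ring
  have hrc2 : (r + 1) * cols = r * cols + cols := by ring
  have C1 : ¬(r * cols + c < r * cols + (c - 1)) := by linarith
  have C3 : ¬(r * cols + c < (r - 1) * cols + c) := by linarith
  have C5 : ¬(r * cols + c < (r - 1) * cols + (c - 1)) := by linarith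
  have C5' : ¬(r * cols + c < (r - 1) * cols + (c + 1)) := by linarith
  have C4' : r * cols + c < (r + 1) * cols + c := by linarith
  have hEne : ∀ v : Int, (r * cols + c, v) ∉ E := by
    intro v hv
    have := hE _ hv
    simp at this
  by_cases hpar : PySem.Int.mod r 2 = 0
  · by_cases h4 : r + 1 < rows
    · have O4 : 0 ≤ r + 1 ∧ r + 1 < rows ∧ 0 ≤ c ∧ c < cols := ⟨by omega, h4, hc.1, hc.2⟩
      by_cases h2 : c + 1 < cols
      · have O2 : 0 ≤ r ∧ r < rows ∧ 0 ≤ c + 1 ∧ c + 1 < cols := ⟨hr.1, hr.2, by omega, h2⟩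
        have C2 : r * cols + c < r * cols + (c + 1) := by linarith
        have M2 : ((r * cols + c, r * cols + (c + 1)) : Int × Int) ∉ E := hEne _
        have M4 : ((r * cols + c, (r + 1) * cols + c) : Int × Int) ∉
            E ++ [(r * cols + c, r * cols + (c + 1))] := by
          simp only [List.mem_append, List.mem_singleton, Prod.mk.injEq, not_or]
          exact ⟨hEne _, by intro h; have := h.2; linarith⟩
        by_cases h6 : 0 ≤ c - 1
        · have O6 : 0 ≤ r + 1 ∧ r + 1 < rows ∧ 0 ≤ c - 1 ∧ c - 1 < cols := ⟨by omega, h4, h6, by omega⟩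
          have C6 : r * cols + c < (r + 1) * cols + (c - 1) := by linarith
          have M6 : ((r * cols + c, (r + 1) * cols + (c - 1)) : Int × Int) ∉
              (E ++ [(r * cols + c, r * cols + (c + 1))]) ++ [(r * cols + c, (r + 1) * cols + c)] := by
            simp only [List.mem_append, List.mem_singleton, Prod.mk.injEq, not_or]
            exact ⟨⟨hEne _, by intro h; have := h.2; linarith⟩, by intro h; have := h.2; linarith⟩
          simp only [hpar, if_true, List.cons_append, List.nil_append, List.foldl_cons,
            List.foldl_nil, C1, C3, C5, C2, C6, C4', O2, O4, O6, if_false, ite_self,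
            and_self, eq_self_iff_true]
          rw [set_add_of_not_mem M2, set_add_of_not_mem M4, set_add_of_not_mem M6]
          simp only [pvSiteA, hpar, if_true, if_pos h2, if_pos h4, if_pos (And.intro h4 h6),
            List.append_assoc]
          all_goals ring_nf
          all_goals simp
        · have N6 : ¬(0 ≤ r + 1 ∧ r + 1 < rows ∧ 0 ≤ c - 1 ∧ c - 1 < cols) := fun h => h6 h.2.2.1
          simp only [hpar, if_true, List.cons_append, List.nil_append, List.foldl_cons,
            List.foldl_nil, C1, C3, C5, C2, C4', O2, O4, h6, if_false, and_false, false_and, ite_self,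
            and_self, eq_self_iff_true]
          rw [set_add_of_not_mem M2, set_add_of_not_mem M4]
          simp only [pvSiteA, hpar, if_true, if_pos h2, if_pos h4,
            if_neg (show ¬(r + 1 < rows ∧ 0 ≤ c - 1) from fun h => h6 h.2),
            List.append_assoc, List.append_nil]
          all_goals ring_nf
          all_goals simp
      · have N2 : ¬(0 ≤ r ∧ r < rows ∧ 0 ≤ c + 1 ∧ c + 1 < cols) := fun h => h2 h.2.2.2
        have M4' : ((r * cols + c, (r + 1) * cols + c) : Int × Int) ∉ E := hEne _
        by_cases h6 : 0 ≤ c - 1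
        · have O6 : 0 ≤ r + 1 ∧ r + 1 < rows ∧ 0 ≤ c - 1 ∧ c - 1 < cols := ⟨by omega, h4, h6, by omega⟩
          have C6 : r * cols + c < (r + 1) * cols + (c - 1) := by linarith
          have M6' : ((r * cols + c, (r + 1) * cols + (c - 1)) : Int × Int) ∉
              E ++ [(r * cols + c, (r + 1) * cols + c)] := by
            simp only [List.mem_append, List.mem_singleton, Prod.mk.injEq, not_or]
            exact ⟨hEne _, by intro h; have := h.2; linarith⟩
          simp only [hpar, if_true, List.cons_append, List.nil_append, List.foldl_cons,
            List.foldl_nil, C1, C3, C5, C6, C4', h2, O4, O6, if_false, and_false, false_and, ite_self,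
            and_self, eq_self_iff_true]
          rw [set_add_of_not_mem M4', set_add_of_not_mem M6']
          simp only [pvSiteA, hpar, if_true, if_neg h2, if_pos h4, if_pos (And.intro h4 h6),
            List.append_assoc, List.nil_append]
          all_goals ring_nf
          all_goals simp
        · have N6 : ¬(0 ≤ r + 1 ∧ r + 1 < rows ∧ 0 ≤ c - 1 ∧ c - 1 < cols) := fun h => h6 h.2.2.1
          simp only [hpar, if_true, List.cons_append, List.nil_append, List.foldl_cons,
            List.foldl_nil, C1, C3, C5, C4', h2, O4, h6, if_false, and_false, false_and, ite_self,
            and_self, eq_self_iff_true]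
          rw [set_add_of_not_mem M4']
          simp only [pvSiteA, hpar, if_true, if_neg h2, if_pos h4,
            if_neg (show ¬(r + 1 < rows ∧ 0 ≤ c - 1) from fun h => h6 h.2),
            List.append_assoc, List.append_nil, List.nil_append]
          all_goals ring_nf
          all_goals simp
    · have N4 : ¬(0 ≤ r + 1 ∧ r + 1 < rows ∧ 0 ≤ c ∧ c < cols) := fun h => h4 h.2.1
      have N6 : ¬(0 ≤ r + 1 ∧ r + 1 < rows ∧ 0 ≤ c - 1 ∧ c - 1 < cols) := fun h => h4 h.2.1
      by_cases h2 : c + 1 < cols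
      · have O2 : 0 ≤ r ∧ r < rows ∧ 0 ≤ c + 1 ∧ c + 1 < cols := ⟨hr.1, hr.2, by omega, h2⟩
        have C2 : r * cols + c < r * cols + (c + 1) := by linarith
        have M2 : ((r * cols + c, r * cols + (c + 1)) : Int × Int) ∉ E := hEne _
        simp only [hpar, if_true, List.cons_append, List.nil_append, List.foldl_cons,
          List.foldl_nil, C1, C3, C5, C2, O2, h4, if_false, and_false, false_and, ite_self,
          and_self, eq_self_iff_true]
        rw [set_add_of_not_mem M2]
        simp only [pvSiteA, hpar, if_true, if_pos h2, if_neg h4,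
          if_neg (show ¬(r + 1 < rows ∧ 0 ≤ c - 1) from fun h => h4 h.1),
          List.append_assoc, List.append_nil, List.nil_append]
        all_goals ring_nf
        all_goals simp
      · have N2 : ¬(0 ≤ r ∧ r < rows ∧ 0 ≤ c + 1 ∧ c + 1 < cols) := fun h => h2 h.2.2.2
        simp only [hpar, if_true, List.cons_append, List.nil_append, List.foldl_cons,
          List.foldl_nil, C1, C3, C5, h2, h4, if_false, and_false, false_and, ite_self,
          and_self, eq_self_iff_true]
        simp only [pvSiteA, hpar, if_true, if_neg h2, if_neg h4,
          if_neg (show ¬(r + 1 < rows ∧ 0 ≤ c - 1) from fun h => h4 h.1),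
          List.append_assoc, List.append_nil, List.nil_append]
        all_goals ring_nf
        all_goals simp
  · by_cases h4 : r + 1 < rows
    · have O4 : 0 ≤ r + 1 ∧ r + 1 < rows ∧ 0 ≤ c ∧ c < cols := ⟨by omega, h4, hc.1, hc.2⟩
      by_cases h2 : c + 1 < cols
      · have O2 : 0 ≤ r ∧ r < rows ∧ 0 ≤ c + 1 ∧ c + 1 < cols := ⟨hr.1, hr.2, by omega, h2⟩
        have C2 : r * cols + c < r * cols + (c + 1) := by linarith
        have O6 : 0 ≤ r + 1 ∧ r + 1 < rows ∧ 0 ≤ c + 1 ∧ c + 1 < cols := ⟨by omega, h4, by omega, h2⟩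
        have C6 : r * cols + c < (r + 1) * cols + (c + 1) := by linarith
        have M2 : ((r * cols + c, r * cols + (c + 1)) : Int × Int) ∉ E := hEne _
        have M4 : ((r * cols + c, (r + 1) * cols + c) : Int × Int) ∉
            E ++ [(r * cols + c, r * cols + (c + 1))] := by
          simp only [List.mem_append, List.mem_singleton, Prod.mk.injEq, not_or]
          exact ⟨hEne _, by intro h; have := h.2; linarith⟩
        have M6 : ((r * cols + c, (r + 1) * cols + (c + 1)) : Int × Int) ∉
            (E ++ [(r * cols + c, r * cols + (c + 1))]) ++ [(r * cols + c, (r + 1) * cols + c)] := by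
          simp only [List.mem_append, List.mem_singleton, Prod.mk.injEq, not_or]
          exact ⟨⟨hEne _, by intro h; have := h.2; linarith⟩, by intro h; have := h.2; linarith⟩
        simp only [hpar, if_true, List.cons_append, List.nil_append, List.foldl_cons,
          List.foldl_nil, C1, C3, C5', C2, C6, C4', O2, O4, O6, if_false, ite_self,
          and_self, eq_self_iff_true, if_neg hpar]
        rw [set_add_of_not_mem M2, set_add_of_not_mem M4, set_add_of_not_mem M6]
        simp only [pvSiteA, if_neg hpar, if_pos h2, if_pos h4, if_pos (And.intro h4 h2),
          List.append_assoc]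
        all_goals ring_nf
        all_goals simp
      · have N2 : ¬(0 ≤ r ∧ r < rows ∧ 0 ≤ c + 1 ∧ c + 1 < cols) := fun h => h2 h.2.2.2
        have M4' : ((r * cols + c, (r + 1) * cols + c) : Int × Int) ∉ E := hEne _
        simp only [hpar, List.cons_append, List.nil_append, List.foldl_cons,
          List.foldl_nil, C1, C3, C5', C4', h2, O4, if_false, and_false, false_and, ite_self,
          and_self, eq_self_iff_true, if_neg hpar]
        rw [set_add_of_not_mem M4']
        simp only [pvSiteA, if_neg hpar, if_neg h2, if_pos h4,
          if_neg (show ¬(r + 1 < rows ∧ c + 1 < cols) from fun h => h2 h.2),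
          List.append_assoc, List.append_nil, List.nil_append]
        all_goals ring_nf
        all_goals simp
    · have N4 : ¬(0 ≤ r + 1 ∧ r + 1 < rows ∧ 0 ≤ c ∧ c < cols) := fun h => h4 h.2.1
      have N6 : ¬(0 ≤ r + 1 ∧ r + 1 < rows ∧ 0 ≤ c + 1 ∧ c + 1 < cols) := fun h => h4 h.2.1
      by_cases h2 : c + 1 < cols
      · have O2 : 0 ≤ r ∧ r < rows ∧ 0 ≤ c + 1 ∧ c + 1 < cols := ⟨hr.1, hr.2, by omega, h2⟩
        have C2 : r * cols + c < r * cols + (c + 1) := by linarith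
        have M2 : ((r * cols + c, r * cols + (c + 1)) : Int × Int) ∉ E := hEne _
        simp only [hpar, List.cons_append, List.nil_append, List.foldl_cons,
          List.foldl_nil, C1, C3, C5', C2, O2, h4, if_false, and_false, false_and, ite_self,
          and_self, eq_self_iff_true, if_neg hpar]
        rw [set_add_of_not_mem M2]
        simp only [pvSiteA, if_neg hpar, if_pos h2, if_neg h4,
          if_neg (show ¬(r + 1 < rows ∧ c + 1 < cols) from fun h => h4 h.1),
          List.append_assoc, List.append_nil, List.nil_append]
        all_goals ring_nf
        all_goals simp
      · have N2 : ¬(0 ≤ r ∧ r < rows ∧ 0 ≤ c + 1 ∧ c + 1 < cols) := fun h => h2 h.2.2.2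
        simp only [hpar, List.cons_append, List.nil_append, List.foldl_cons,
          List.foldl_nil, C1, C3, C5', h2, h4, if_false, and_false, false_and, ite_self,
          and_self, eq_self_iff_true, if_neg hpar]
        simp only [pvSiteA, if_neg hpar, if_neg h2, if_neg h4,
          if_neg (show ¬(r + 1 < rows ∧ c + 1 < cols) from fun h => h4 h.1),
          List.append_assoc, List.append_nil, List.nil_append]
        all_goals ring_nf
        all_goals simp

lemma pvSiteA_fst (rows cols r c : Int) : ∀ e ∈ pvSiteA rows cols r c, e.1 = r * cols + c := by
  intro e he
  unfold pvSiteA at he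
  simp only [List.mem_append] at he
  rcases he with (h | h) | h <;> split_ifs at h <;> simp_all

lemma pvRowA_fold (rows cols r : Int) (hr : 0 ≤ r ∧ r < rows) :
    ∀ (n : Nat) (c0 : Int) (E : List (Int × Int)), (cols - c0).toNat ≤ n → 0 ≤ c0 →
    (∀ e ∈ E, e.1 < r * cols + c0) →
    ((PySem.List.pyRange c0 cols 1).foldl (fun E c =>
      (([(r, c-1), (r, c+1), (r-1, c), (r+1, c)] ++
        (if PySem.Int.mod r 2 = 0 then [(r-1, c-1), (r+1, c-1)] else [(r-1, c+1), (r+1, c+1)])).foldl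
      (fun E rc =>
        if 0 ≤ rc.1 ∧ rc.1 < rows ∧ 0 ≤ rc.2 ∧ rc.2 < cols then
          if r * cols + c < rc.1 * cols + rc.2 then PySem.Set.add E (r * cols + c, rc.1 * cols + rc.2) else E
        else E) E)) E)
      = E ++ (PySem.List.pyRange c0 cols 1).flatMap (fun c => pvSiteA rows cols r c) := by
  intro n
  induction n with
  | zero =>
    intro c0 E hn _ _
    have h : cols ≤ c0 := by omega
    rw [PySem.List.pyRange_one_eq_nil h]
    simp
  | succ n ih =>
    intro c0 E hn hc0 hE
    by_cases h : cols ≤ c0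
    · rw [PySem.List.pyRange_one_eq_nil h]; simp
    · push_neg at h
      rw [PySem.List.pyRange_one_cons h]
      simp only [List.foldl_cons, List.flatMap_cons]
      rw [pvInnerA rows cols r c0 E hr ⟨hc0, h⟩ hE]
      rw [ih (c0 + 1) (E ++ pvSiteA rows cols r c0) (by omega) (by omega) ?_]
      · rw [List.append_assoc]
      · intro e he
        rcases List.mem_append.mp he with h1 | h1
        · have := hE e h1; linarith
        · have := pvSiteA_fst rows cols r c0 e h1; linarith

lemma pvAllA_fold (rows cols : Int) (hcols : 0 < cols) :
    ∀ (n : Nat) (r0 : Int) (E : List (Int × Int)), (rows - r0).toNat ≤ n → 0 ≤ r0 →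
    (∀ e ∈ E, e.1 < r0 * cols) →
    ((PySem.List.pyRange r0 rows 1).foldl (fun E r =>
      (PySem.List.pyRange 0 cols 1).foldl (fun E c =>
      (([(r, c-1), (r, c+1), (r-1, c), (r+1, c)] ++
        (if PySem.Int.mod r 2 = 0 then [(r-1, c-1), (r+1, c-1)] else [(r-1, c+1), (r+1, c+1)])).foldl
      (fun E rc =>
        if 0 ≤ rc.1 ∧ rc.1 < rows ∧ 0 ≤ rc.2 ∧ rc.2 < cols then
          if r * cols + c < rc.1 * cols + rc.2 then PySem.Set.add E (r * cols + c, rc.1 * cols + rc.2) else E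
        else E) E)) E) E)
      = E ++ (PySem.List.pyRange r0 rows 1).flatMap (fun r =>
          (PySem.List.pyRange 0 cols 1).flatMap (fun c => pvSiteA rows cols r c)) := by
  intro n
  induction n with
  | zero =>
    intro r0 E hn _ _
    have h : rows ≤ r0 := by omega
    rw [PySem.List.pyRange_one_eq_nil h]
    simp
  | succ n ih =>
    intro r0 E hn hr0 hE
    by_cases h : rows ≤ r0
    · rw [PySem.List.pyRange_one_eq_nil h]; simp
    · push_neg at h
      rw [PySem.List.pyRange_one_cons h]
      simp only [List.foldl_cons, List.flatMap_cons]
      rw [pvRowA_fold rows cols r0 ⟨hr0, h⟩ (cols - 0).toNat 0 E (by omega) (by omega)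
        (by intro e he; have := hE e he; omega)]
      rw [ih (r0 + 1) _ (by omega) (by omega) ?_]
      · rw [List.append_assoc]
      · intro e he
        have hrc : (r0 + 1) * cols = r0 * cols + cols := by ring
        rcases List.mem_append.mp he with h1 | h1
        · have := hE e h1
          linarith
        · rcases List.mem_flatMap.mp h1 with ⟨c, hcmem, hce⟩
          have hc := PySem.List.mem_pyRange_one.mp hcmem
          have := pvSiteA_fst rows cols r0 c e hce
          linarith

def pvSiteB (rows cols r c : Int) : List (Int × Int) :=
  let u := r * cols + c
  (if c + 1 < cols then [(u, u + 1)] else []) ++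
  (if r + 1 < rows then
     (if PySem.Int.mod r 2 = 0 ∧ c - 1 ≥ 0 then [(u, u + cols - 1)] else []) ++
     [(u, u + cols)] ++
     (if PySem.Int.mod r 2 = 1 ∧ c + 1 < cols then [(u, u + cols + 1)] else [])
   else [])

lemma pvInnerB (rows cols r c : Int) (E : List (Int × Int)) :
    (let u := r * cols + c
     let E1 := if c + 1 < cols then E ++ [(u, u + 1)] else E
     if r + 1 < rows then
       let E2 := if PySem.Int.mod r 2 = 0 ∧ c - 1 ≥ 0 then E1 ++ [(u, u + cols - 1)] else E1
       let E3 := E2 ++ [(u, u + cols)]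
       if PySem.Int.mod r 2 = 1 ∧ c + 1 < cols then E3 ++ [(u, u + cols + 1)] else E3
     else E1)
      = E ++ pvSiteB rows cols r c := by
  simp only [pvSiteB]
  split_ifs <;> simp [List.append_assoc]

lemma pvRowB_fold (rows cols r : Int) :
    ∀ (n : Nat) (c0 : Int) (E : List (Int × Int)), (cols - c0).toNat ≤ n →
    ((PySem.List.pyRange c0 cols 1).foldl (fun E c =>
      let u := r * cols + c
      let E1 := if c + 1 < cols then E ++ [(u, u + 1)] else E
      if r + 1 < rows then
        let E2 := if PySem.Int.mod r 2 = 0 ∧ c - 1 ≥ 0 then E1 ++ [(u, u + cols - 1)] else E1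
        let E3 := E2 ++ [(u, u + cols)]
        if PySem.Int.mod r 2 = 1 ∧ c + 1 < cols then E3 ++ [(u, u + cols + 1)] else E3
      else E1) E)
      = E ++ (PySem.List.pyRange c0 cols 1).flatMap (fun c => pvSiteB rows cols r c) := by
  intro n
  induction n with
  | zero =>
    intro c0 E hn
    have h : cols ≤ c0 := by omega
    rw [PySem.List.pyRange_one_eq_nil h]; simp
  | succ n ih =>
    intro c0 E hn
    by_cases h : cols ≤ c0
    · rw [PySem.List.pyRange_one_eq_nil h]; simp
    · push_neg at h
      rw [PySem.List.pyRange_one_cons h]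
      simp only [List.foldl_cons, List.flatMap_cons]
      rw [pvInnerB rows cols r c0 E]
      rw [ih (c0 + 1) _ (by omega)]
      rw [List.append_assoc]

lemma pvAllB_fold (rows cols : Int) :
    ∀ (n : Nat) (r0 : Int) (E : List (Int × Int)), (rows - r0).toNat ≤ n →
    ((PySem.List.pyRange r0 rows 1).foldl (fun E r =>
      (PySem.List.pyRange 0 cols 1).foldl (fun E c =>
        let u := r * cols + c
        let E1 := if c + 1 < cols then E ++ [(u, u + 1)] else E
        if r + 1 < rows then
          let E2 := if PySem.Int.mod r 2 = 0 ∧ c - 1 ≥ 0 then E1 ++ [(u, u + cols - 1)] else E1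
          let E3 := E2 ++ [(u, u + cols)]
          if PySem.Int.mod r 2 = 1 ∧ c + 1 < cols then E3 ++ [(u, u + cols + 1)] else E3
        else E1) E) E)
      = E ++ (PySem.List.pyRange r0 rows 1).flatMap (fun r =>
          (PySem.List.pyRange 0 cols 1).flatMap (fun c => pvSiteB rows cols r c)) := by
  intro n
  induction n with
  | zero =>
    intro r0 E hn
    have h : rows ≤ r0 := by omega
    rw [PySem.List.pyRange_one_eq_nil h]; simp
  | succ n ih =>
    intro r0 E hn
    by_cases h : rows ≤ r0
    · rw [PySem.List.pyRange_one_eq_nil h]; simp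
    · push_neg at h
      rw [PySem.List.pyRange_one_cons h]
      simp only [List.foldl_cons, List.flatMap_cons]
      rw [pvRowB_fold rows cols r0 (cols - 0).toNat 0 E (by omega)]
      rw [ih (r0 + 1) _ (by omega)]
      rw [List.append_assoc]

def pvLexlt (a b : Int × Int) : Prop := a.1 < b.1 ∨ (a.1 = b.1 ∧ a.2 < b.2)
def pvLexle (a b : Int × Int) : Prop := ¬ pvLexlt b a
def pvLexB (a b : Int × Int) : Bool :=
  decide (a.1 < b.1) || (!decide (b.1 < a.1) && decide (a.2 < b.2))

lemma pvLexB_iff (a b : Int × Int) : pvLexB a b = true ↔ pvLexlt a b := by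
  unfold pvLexB pvLexlt
  simp only [Bool.or_eq_true, Bool.and_eq_true, Bool.not_eq_true', decide_eq_true_eq,
    decide_eq_false_iff_not]
  constructor
  · rintro (h | ⟨h1, h2⟩)
    · exact Or.inl h
    · rcases lt_trichotomy a.1 b.1 with h | h | h
      · exact Or.inl h
      · exact Or.inr ⟨h, h2⟩
      · exact absurd h h1
  · rintro (h | ⟨h1, h2⟩)
    · exact Or.inl h
    · exact Or.inr ⟨by omega, h2⟩

lemma pvSite_perm (rows cols r c : Int) :
    (pvSiteB rows cols r c).Perm (pvSiteA rows cols r c) := by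
  have h2 : (0:Int) < 2 := by norm_num
  have hge := PySem.Int.mod_nonneg (a := r) h2
  have hlt := PySem.Int.mod_lt (a := r) h2
  unfold pvSiteA pvSiteB
  have hm : PySem.Int.mod r 2 = 0 ∨ PySem.Int.mod r 2 = 1 := by omega
  rcases hm with h | h <;>
    simp only [h, if_true, if_false, true_and, false_and, eq_self_iff_true, List.append_nil,
      ite_true, ite_false, zero_ne_one, one_ne_zero, List.nil_append] <;>
    split_ifs <;>
    simp [List.append_assoc] <;>
    first
      | exact List.Perm.refl _
      | exact List.Perm.cons _ (List.Perm.swap _ _ _)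
      | exact List.Perm.swap _ _ _
      | omega

lemma pvSiteB_fst (rows cols r c : Int) : ∀ e ∈ pvSiteB rows cols r c, e.1 = r * cols + c := by
  intro e he
  unfold pvSiteB at he
  split_ifs at he <;> simp_all [List.mem_append] <;> aesop

lemma pvSiteB_pairwise (rows cols r c : Int) (hc : 0 ≤ c) :
    (pvSiteB rows cols r c).Pairwise pvLexlt := by
  have h2 : (0:Int) < 2 := by norm_num
  have hge := PySem.Int.mod_nonneg (a := r) h2
  have hlt := PySem.Int.mod_lt (a := r) h2
  have hm : PySem.Int.mod r 2 = 0 ∨ PySem.Int.mod r 2 = 1 := by omega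
  unfold pvSiteB
  rcases hm with h | h <;>
    simp only [h, if_true, if_false, true_and, false_and, eq_self_iff_true, List.append_nil,
      ite_true, ite_false, zero_ne_one, one_ne_zero, List.nil_append] <;>
    split_ifs <;>
    simp_all [pvLexlt, List.pairwise_cons] <;>
    omega

lemma pvPairwise_flatMap {α β : Type} (R : β → β → Prop) (l : List α) (f : α → List β)
    (h1 : ∀ a ∈ l, (f a).Pairwise R)
    (h2 : l.Pairwise (fun a b => ∀ x ∈ f a, ∀ y ∈ f b, R x y)) :
    (l.flatMap f).Pairwise R := by
  induction l with
  | nil => simp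
  | cons x xs ih =>
    simp only [List.flatMap_cons]
    rw [List.pairwise_append]
    refine ⟨h1 x (by simp), ih (fun a ha => h1 a (by simp [ha])) h2.of_cons, ?_⟩
    intro a ha b hb
    rw [List.mem_flatMap] at hb
    obtain ⟨y, hy, hby⟩ := hb
    exact (List.pairwise_cons.mp h2).1 y hy a ha b hby

lemma pvAllB_pairwise (rows cols : Int) :
    ((PySem.List.pyRange 0 rows 1).flatMap (fun r =>
      (PySem.List.pyRange 0 cols 1).flatMap (fun c => pvSiteB rows cols r c))).Pairwise pvLexlt := by
  apply pvPairwise_flatMap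
  · intro r hrmem
    apply pvPairwise_flatMap
    · intro c hcmem
      exact pvSiteB_pairwise rows cols r c (PySem.List.mem_pyRange_one.mp hcmem).1
    · have hp := PySem.List.pairwise_lt_pyRange_one (a := (0:Int)) (b := cols)
      refine hp.imp_of_mem ?_
      intro c c' hcm hcm' hlt x hx y hy
      have h1 := pvSiteB_fst rows cols r c x hx
      have h2 := pvSiteB_fst rows cols r c' y hy
      left
      omega
  · have hp := PySem.List.pairwise_lt_pyRange_one (a := (0:Int)) (b := rows)
    refine hp.imp_of_mem ?_
    intro r r' hrm hrm' hlt x hx y hy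
    obtain ⟨c, hcm, hcx⟩ := List.mem_flatMap.mp hx
    obtain ⟨c', hcm', hcy⟩ := List.mem_flatMap.mp hy
    have h1 := pvSiteB_fst rows cols r c x hcx
    have h2 := pvSiteB_fst rows cols r' c' y hcy
    have hcb := PySem.List.mem_pyRange_one.mp hcm
    have hcb' := PySem.List.mem_pyRange_one.mp hcm'
    left
    have e1 : (r + 1) * cols ≤ r' * cols :=
      mul_le_mul_of_nonneg_right (by omega) (by omega)
    have e2 : (r + 1) * cols = r * cols + cols := by ring
    linarith

lemma pvInsertBy_pairwise (x : Int × Int) (ys : List (Int × Int))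
    (h : ys.Pairwise pvLexle) : (PySem.List.insertBy pvLexB x ys).Pairwise pvLexle := by
  induction ys with
  | nil => simp [PySem.List.insertBy]
  | cons y ys ih =>
    by_cases hb : pvLexB x y = true
    · have hxy : pvLexlt x y := (pvLexB_iff x y).mp hb
      rw [show PySem.List.insertBy pvLexB x (y :: ys) = x :: y :: ys from by
        simp [PySem.List.insertBy, hb]]
      rw [List.pairwise_cons]
      refine ⟨?_, h⟩
      intro z hz
      rcases List.mem_cons.mp hz with rfl | hz
      · unfold pvLexle pvLexlt at *
        omega
      · have := (List.pairwise_cons.mp h).1 z hz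
        unfold pvLexle pvLexlt at *
        omega
    · rw [show PySem.List.insertBy pvLexB x (y :: ys) = y :: PySem.List.insertBy pvLexB x ys from by
        simp [PySem.List.insertBy, hb]]
      rw [List.pairwise_cons]
      constructor
      · intro z hz
        rcases (PySem.List.insertBy_mem_iff pvLexB x z ys).mp hz with hz1 | hz
        · rw [hz1]
          have : ¬ pvLexlt x y := fun hc => hb ((pvLexB_iff x y).mpr hc)
          unfold pvLexle pvLexlt at *
          omega
        · exact (List.pairwise_cons.mp h).1 z hz
      · exact ih (List.pairwise_cons.mp h).2

lemma pvFoldl_insertBy_pairwise (xs acc : List (Int × Int)) (h : acc.Pairwise pvLexle) :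
    (xs.foldl (fun a x => PySem.List.insertBy pvLexB x a) acc).Pairwise pvLexle := by
  induction xs generalizing acc with
  | nil => exact h
  | cons x xs ih => exact ih _ (pvInsertBy_pairwise x acc h)

lemma pvFoldl_insertBy_perm (xs acc : List (Int × Int)) :
    (xs.foldl (fun a x => PySem.List.insertBy pvLexB x a) acc).Perm (acc ++ xs) := by
  induction xs generalizing acc with
  | nil => simp
  | cons x xs ih =>
    simp only [List.foldl_cons]
    refine (ih _).trans ?_
    exact ((PySem.List.insertBy_perm pvLexB x acc).append_right xs).trans List.perm_middle.symm

lemma pvSorted2_eq (xs ys : List (Int × Int)) (hperm : ys.Perm xs)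
    (hs : ys.Pairwise pvLexlt) :
    PySem.List.sorted2 xs Prod.fst Prod.snd = ys := by
  have hdef : PySem.List.sorted2 xs Prod.fst Prod.snd =
      xs.foldl (fun a x => PySem.List.insertBy pvLexB x a) [] := rfl
  rw [hdef]
  have hp : (xs.foldl (fun a x => PySem.List.insertBy pvLexB x a) []).Perm xs := by
    simpa using pvFoldl_insertBy_perm xs []
  have hsort := pvFoldl_insertBy_pairwise xs [] (by simp)
  have hys_le : ys.Pairwise pvLexle := hs.imp (by
    intro a b hab
    unfold pvLexle pvLexlt at *
    omega)
  refine List.Perm.eq_of_pairwise ?_ hsort hys_le (hp.trans hperm.symm)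
  intro a b _ _ h1 h2
  unfold pvLexle pvLexlt at h1 h2
  have : a.1 = b.1 ∧ a.2 = b.2 := by omega
  exact Prod.ext this.1 this.2

lemma pvFlatMap_perm {α β : Type} (l : List α) (f g : α → List β)
    (h : ∀ a ∈ l, (f a).Perm (g a)) : (l.flatMap f).Perm (l.flatMap g) := by
  induction l with
  | nil => simp
  | cons x xs ih =>
    simp only [List.flatMap_cons]
    exact (h x (by simp)).append (ih (fun a ha => h a (by simp [ha])))

lemma pvPortA_fold_eq (rows cols : Int) (hcols : 0 < cols) :
    ((PySem.List.pyRange 0 rows 1).foldl (fun E r =>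
      (PySem.List.pyRange 0 cols 1).foldl (fun E c =>
      (([(r, c-1), (r, c+1), (r-1, c), (r+1, c)] ++
        (if PySem.Int.mod r 2 = 0 then [(r-1, c-1), (r+1, c-1)] else [(r-1, c+1), (r+1, c+1)])).foldl
      (fun E rc =>
        if 0 ≤ rc.1 ∧ rc.1 < rows ∧ 0 ≤ rc.2 ∧ rc.2 < cols then
          if r * cols + c < rc.1 * cols + rc.2 then PySem.Set.add E (r * cols + c, rc.1 * cols + rc.2) else E
        else E) E)) E) [])
      = (PySem.List.pyRange 0 rows 1).flatMap (fun r =>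
          (PySem.List.pyRange 0 cols 1).flatMap (fun c => pvSiteA rows cols r c)) := by
  simpa using pvAllA_fold rows cols hcols (rows - 0).toNat 0 [] (by omega) (by omega) (by simp)

lemma pvPortB_fold_eq (rows cols : Int) :
    ((PySem.List.pyRange 0 rows 1).foldl (fun E r =>
      (PySem.List.pyRange 0 cols 1).foldl (fun E c =>
        let u := r * cols + c
        let E1 := if c + 1 < cols then E ++ [(u, u + 1)] else E
        if r + 1 < rows then
          let E2 := if PySem.Int.mod r 2 = 0 ∧ c - 1 ≥ 0 then E1 ++ [(u, u + cols - 1)] else E1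
          let E3 := E2 ++ [(u, u + cols)]
          if PySem.Int.mod r 2 = 1 ∧ c + 1 < cols then E3 ++ [(u, u + cols + 1)] else E3
        else E1) E) [])
      = (PySem.List.pyRange 0 rows 1).flatMap (fun r =>
          (PySem.List.pyRange 0 cols 1).flatMap (fun c => pvSiteB rows cols r c)) := by
  simpa using pvAllB_fold rows cols (rows - 0).toNat 0 [] (by omega)

theorem pv_main (rows cols : Int) :
    build_hex_edges_rect_py rows cols = build_hex_edges_rect_py_alt rows cols := by
  have hB : build_hex_edges_rect_py_alt rows cols =
      (PySem.List.pyRange 0 (rows * cols) 1,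
       (PySem.List.pyRange 0 rows 1).flatMap (fun r =>
         (PySem.List.pyRange 0 cols 1).flatMap (fun c => pvSiteB rows cols r c))) := by
    rw [show build_hex_edges_rect_py_alt rows cols =
      (PySem.List.pyRange 0 (rows * cols) 1,
       (PySem.List.pyRange 0 rows 1).foldl (fun E r =>
        (PySem.List.pyRange 0 cols 1).foldl (fun E c =>
          let u := r * cols + c
          let E1 := if c + 1 < cols then E ++ [(u, u + 1)] else E
          if r + 1 < rows then
            let E2 := if PySem.Int.mod r 2 = 0 ∧ c - 1 ≥ 0 then E1 ++ [(u, u + cols - 1)] else E1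
            let E3 := E2 ++ [(u, u + cols)]
            if PySem.Int.mod r 2 = 1 ∧ c + 1 < cols then E3 ++ [(u, u + cols + 1)] else E3
          else E1) E) []) from rfl]
    rw [pvPortB_fold_eq rows cols]
  have hAfold : build_hex_edges_rect_py rows cols =
      (PySem.List.pyRange 0 (rows * cols) 1,
       PySem.List.sorted2
        ((PySem.List.pyRange 0 rows 1).foldl (fun E r =>
          (PySem.List.pyRange 0 cols 1).foldl (fun E c =>
          (([(r, c-1), (r, c+1), (r-1, c), (r+1, c)] ++
            (if PySem.Int.mod r 2 = 0 then [(r-1, c-1), (r+1, c-1)] else [(r-1, c+1), (r+1, c+1)])).foldl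
          (fun E rc =>
            if 0 ≤ rc.1 ∧ rc.1 < rows ∧ 0 ≤ rc.2 ∧ rc.2 < cols then
              if r * cols + c < rc.1 * cols + rc.2 then PySem.Set.add E (r * cols + c, rc.1 * cols + rc.2) else E
            else E) E)) E) []) Prod.fst Prod.snd) := rfl
  by_cases hcols : 0 < cols
  · rw [hAfold, pvPortA_fold_eq rows cols hcols, hB]
    rw [Prod.mk.injEq]
    refine ⟨rfl, ?_⟩
    exact pvSorted2_eq _ _
      (pvFlatMap_perm _ _ _ (fun r _ =>
        pvFlatMap_perm _ _ _ (fun c _ => pvSite_perm rows cols r c)))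
      (pvAllB_pairwise rows cols)
  · have hnil : PySem.List.pyRange 0 cols 1 = [] := PySem.List.pyRange_one_eq_nil (by omega)
    rw [hAfold, hB, hnil]
    simp [PySem.List.sorted2]

-- ===== VERDICT (by name: the statement is the Claim_ definition above) =====
theorem build_hex_edges_rect_py_spec : Claim_equal_build_hex_edges_rect_py := by
  intro rows cols _
  unfold Spec_build_hex_edges_rect_py
  exact pv_main rows cols
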